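-- pv_equiv track=rewrite | github.com/MartinNoboa/Metodos | Activities/Activity04/runTests.py | runsTablePositiveSign
-- ===== SOURCE A (Python) =====
-- def runsTablePositiveSign(signs,numSigns):
--     positiveCount=0
--     lastSymbol="x"
--     for i in range(numSigns):
--         if(signs[i]=="+" and lastSymbol !="+"):
--            positiveCount+=1
--         lastSymbol=signs[i]
--     return positiveCount
-- ===== SOURCE B (Python) =====
-- def runsTablePositiveSign(signs, numSigns):
--     # runs of '+' = (# of '+') - (# of adjacent '+','+' pairs)
--     window = [signs[i] for i in range(numSigns)]
--     plus = window.count("+")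
--     pairs = sum(1 for a, b in zip(window, window[1:]) if a == "+" and b == "+")
--     return plus - pairs
-- ===== Notes on version B (the rewrite author's own statement) =====
-- stated objective: alternative
-- what changed: Replaces the stateful lastSymbol scan with an arithmetic identity computed in staged passes: number of '+' runs = count of '+' symbols minus count of adjacent '+','+' pairs.
import Mathlib
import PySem

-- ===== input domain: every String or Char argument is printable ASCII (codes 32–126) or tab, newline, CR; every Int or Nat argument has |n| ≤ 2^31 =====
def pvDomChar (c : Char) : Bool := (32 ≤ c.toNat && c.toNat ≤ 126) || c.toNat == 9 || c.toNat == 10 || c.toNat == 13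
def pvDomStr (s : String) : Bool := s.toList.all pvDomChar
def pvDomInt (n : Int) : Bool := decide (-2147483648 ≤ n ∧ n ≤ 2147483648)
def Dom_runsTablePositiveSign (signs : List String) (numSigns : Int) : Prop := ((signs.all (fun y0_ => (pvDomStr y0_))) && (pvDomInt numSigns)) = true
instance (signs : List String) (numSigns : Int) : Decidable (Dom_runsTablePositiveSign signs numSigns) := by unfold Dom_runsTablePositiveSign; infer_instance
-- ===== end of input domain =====

-- B drops A's stateful lastSymbol scan for an arithmetic identity in staged passes:
-- number of '+' runs = (count of '+') - (count of adjacent '+','+' pairs)  (alternative; same cost).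

-- ===== PORT A =====
-- the for-loop as a fold over range(numSigns) with state (positiveCount, lastSymbol);
-- signs[i] via pyGet? (in range under Pre_, so the .getD "" default is never taken there)
def runsTablePositiveSign (signs : List String) (numSigns : Int) : Int :=
  ((PySem.List.pyRange 0 numSigns 1).foldl
    (fun (st : Int × String) i =>
      let s := (PySem.List.pyGet? signs i).getD ""
      ((if s = "+" ∧ st.2 ≠ "+" then st.1 + 1 else st.1), s))
    (0, "x")).1

-- ===== PORT B =====
-- window = [signs[i] for i in range(numSigns)]; plus = window.count("+");
-- pairs = sum(1 for a,b in zip(window, window[1:]) if a == "+" and b == "+"); return plus - pairs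
def runsTablePositiveSign_alt (signs : List String) (numSigns : Int) : Int :=
  let window := (PySem.List.pyRange 0 numSigns 1).map (fun i => (PySem.List.pyGet? signs i).getD "")
  let plus : Int := PySem.List.count window "+"
  let pairs : Int :=
    (window.zip (PySem.List.slice window (some 1) none)).foldl
      (fun acc p => if p.1 = "+" ∧ p.2 = "+" then acc + 1 else acc) 0
  plus - pairs

-- ===== PRECONDITION & SPEC =====
-- Pre_: A (and B) raise IndexError when numSigns exceeds len(signs); excluded here.
def Pre_runsTablePositiveSign (signs : List String) (numSigns : Int) : Prop :=
  numSigns ≤ (signs.length : Int)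
instance (signs : List String) (numSigns : Int) : Decidable (Pre_runsTablePositiveSign signs numSigns) := by unfold Pre_runsTablePositiveSign; infer_instance

def pvWitness_runsTablePositiveSign : List String × Int := (["+", "+", "-", "+"], 4)

def Spec_runsTablePositiveSign (signs : List String) (numSigns : Int) (out : Int) : Prop := out = runsTablePositiveSign_alt signs numSigns
instance (signs : List String) (numSigns : Int) (out : Int) : Decidable (Spec_runsTablePositiveSign signs numSigns out) := by unfold Spec_runsTablePositiveSign; infer_instance

-- ===== CLAIM =====
def Claim_equal_runsTablePositiveSign : Prop := ∀ (signs : List String) (numSigns : Int), Dom_runsTablePositiveSign signs numSigns → Pre_runsTablePositiveSign signs numSigns → Spec_runsTablePositiveSign signs numSigns (runsTablePositiveSign signs numSigns)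

-- ===== LEMMAS AND PROOFS =====

-- A's loop body, abstracted over the already-fetched element
def pvStep (st : Int × String) (s : String) : Int × String :=
  ((if s = "+" ∧ st.2 ≠ "+" then st.1 + 1 else st.1), s)

-- proof-side adjacency count: number of adjacent '+','+' pairs in last :: xs
def pvAdj : String → List String → Int
  | _, [] => 0
  | last, s :: rest => (if last = "+" ∧ s = "+" then 1 else 0) + pvAdj s rest

-- A's fold from state (acc, last) = acc + #'+' in xs - #adjacent '+' pairs in last::xs
theorem pvFold_eq (xs : List String) :
    ∀ (last : String) (acc : Int),
      (xs.foldl pvStep (acc, last)).1 = acc + (xs.count "+" : Int) - pvAdj last xs := by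
  induction xs with
  | nil => intro last acc; simp [pvAdj]
  | cons s rest ih =>
      intro last acc
      simp only [List.foldl_cons, pvStep, ih, pvAdj, List.count_cons, beq_iff_eq]
      split_ifs <;> push_cast <;> first | omega | (exfalso; tauto)

-- B's zip-pairs fold equals pvAdj over head/tail
theorem pvPairs_eq (rest : List String) :
    ∀ (s : String) (acc : Int),
      (((s :: rest).zip rest).foldl
        (fun acc p => if p.1 = "+" ∧ p.2 = "+" then acc + 1 else acc) acc)
      = acc + pvAdj s rest := by
  induction rest with
  | nil => intro s acc; simp [pvAdj]
  | cons t r ih =>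
      intro s acc
      simp only [List.zip_cons_cons, List.foldl_cons, ih, pvAdj]
      split_ifs <;> omega

theorem runsTablePositiveSign_eq (signs : List String) (numSigns : Int) :
    runsTablePositiveSign signs numSigns = runsTablePositiveSign_alt signs numSigns := by
  unfold runsTablePositiveSign
  simp only [runsTablePositiveSign_alt, PySem.List.slice_from_one]
  rw [show (fun (st : Int × String) i =>
        let s := (PySem.List.pyGet? signs i).getD ""
        ((if s = "+" ∧ st.2 ≠ "+" then st.1 + 1 else st.1), s))
      = (fun st i => pvStep st ((PySem.List.pyGet? signs i).getD "")) from rfl]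
  rw [← List.foldl_map]
  cases hxs : (PySem.List.pyRange 0 numSigns 1).map (fun i => (PySem.List.pyGet? signs i).getD "") with
  | nil => simp
  | cons s rest =>
      simp only [List.tail_cons]
      rw [pvFold_eq, pvPairs_eq, PySem.List.count_eq]
      simp only [List.count_cons, beq_iff_eq]
      have hx : pvAdj "x" (s :: rest) = pvAdj s rest := by simp [pvAdj]
      rw [hx]
      by_cases hp : s = "+"
      · simp only [hp, if_true]; push_cast; ring
      · simp only [hp, if_false]; push_cast; ring

-- ===== VERDICT =====
theorem runsTablePositiveSign_spec : Claim_equal_runsTablePositiveSign := by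
  intro signs numSigns _ _
  exact runsTablePositiveSign_eq signs numSigns
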